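-- pv_equiv track=rewrite | github.com/eliottcassidy2000/math | 04-computation/palindromic_N_posuniform.py | compute_symmetrized_N
-- ===== SOURCE A (Python) =====
-- def compute_symmetrized_N(paths, n):
--     """N[a][b][j] = #{paths with {a,b} at positions {j,j+1}}"""
--     N = [[[0]*(n-1) for _ in range(n)] for _ in range(n)]
--     for perm in paths:
--         for j in range(n-1):
--             a, b = perm[j], perm[j+1]
--             N[a][b][j] += 1
--             N[b][a][j] += 1  # symmetrize
--     return N
-- ===== SOURCE B (Python) =====
-- def compute_symmetrized_N(paths, n):
--     # Definition-driven: each cube entry is computed independently by scanning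
--     # the paths for the two directed pair matches at that position; there is no
--     # mutable accumulator, no preallocated cube and no twin increments.
--     return [[[sum((p[j] == a and p[j + 1] == b) + (p[j] == b and p[j + 1] == a)
--                   for p in paths)
--               for j in range(n - 1)]
--              for b in range(n)]
--             for a in range(n)]
-- ===== Notes on version B (the rewrite author's own statement) =====
-- stated objective: alternative
-- what changed: Replaces A's single counting pass with twin symmetric increments into a preallocated mutable cube by a pure per-entry computation: each N[a][b][j] is obtained independently by summing indicator matches over the paths (no accumulator, no mutation); this trades an extra factor of n^2 in path scanning for a direct definitional computation.
-- outside the precondition, e.g. on compute_symmetrized_N([[-1, 0]], 2): A returns [[[0], [1]], [[1], [0]]], B returns [[[0], [0]], [[0], [0]]]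
import Mathlib
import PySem

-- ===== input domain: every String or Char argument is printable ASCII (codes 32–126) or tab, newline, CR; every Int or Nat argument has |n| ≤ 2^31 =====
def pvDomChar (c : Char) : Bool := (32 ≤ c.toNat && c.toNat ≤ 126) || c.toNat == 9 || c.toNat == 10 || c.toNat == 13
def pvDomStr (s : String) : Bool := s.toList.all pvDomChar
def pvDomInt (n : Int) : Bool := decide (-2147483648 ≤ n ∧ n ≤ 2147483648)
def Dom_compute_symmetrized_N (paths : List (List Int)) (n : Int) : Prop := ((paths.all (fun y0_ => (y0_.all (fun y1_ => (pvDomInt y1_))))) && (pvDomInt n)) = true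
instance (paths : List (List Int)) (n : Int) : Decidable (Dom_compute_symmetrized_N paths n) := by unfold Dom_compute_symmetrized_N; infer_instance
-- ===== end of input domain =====

-- B computes each cube entry independently as a pure indicator sum over the
-- paths (no mutable cube, no twin increments) — an alternative decomposition.

-- ===== PORT A =====
-- N[x][y][j] += 1 (reads and writes with Python index semantics)
def pvBump3 (N : List (List (List Int))) (x y j : Int) : List (List (List Int)) :=
  let Nx := PySem.List.pyGetD N x []
  let Nxy := PySem.List.pyGetD Nx y []
  let v := PySem.List.pyGetD Nxy j 0
  PySem.List.pySetD N x (PySem.List.pySetD Nx y (PySem.List.pySetD Nxy j (v + 1)))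

def compute_symmetrized_N (paths : List (List Int)) (n : Int) : List (List (List Int)) :=
  let N0 := (PySem.List.pyRange 0 n 1).map (fun _ =>
    (PySem.List.pyRange 0 n 1).map (fun _ => List.replicate (n - 1).toNat (0 : Int)))
  paths.foldl (fun N perm =>
    (PySem.List.pyRange 0 (n - 1) 1).foldl (fun N j =>
      let a := PySem.List.pyGetD perm j 0
      let b := PySem.List.pyGetD perm (j + 1) 0
      pvBump3 (pvBump3 N a b j) b a j) N) N0

-- ===== PORT B =====
def compute_symmetrized_N_alt (paths : List (List Int)) (n : Int) : List (List (List Int)) :=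
  (PySem.List.pyRange 0 n 1).map (fun a =>
    (PySem.List.pyRange 0 n 1).map (fun b =>
      (PySem.List.pyRange 0 (n - 1) 1).map (fun j =>
        paths.foldl (fun s p =>
          s + ((if PySem.List.pyGetD p j 0 = a ∧ PySem.List.pyGetD p (j + 1) 0 = b then (1 : Int) else 0)
             + (if PySem.List.pyGetD p j 0 = b ∧ PySem.List.pyGetD p (j + 1) 0 = a then (1 : Int) else 0))) 0)))

-- ===== PRECONDITION & SPEC =====
-- Pre_ admits the natural domain: for n ≥ 2 every path must have at least n
-- entries whose first n values lie in [0, n) (A raises IndexError on shorter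
-- paths or values ≥ n; on negative values A returns via Python's
-- negative-index wraparound, an accident of the list representation that a
-- pure definitional B has no reason to reproduce, so those are excluded too).
def Pre_compute_symmetrized_N (paths : List (List Int)) (n : Int) : Prop :=
  n ≤ 1 ∨ ∀ perm ∈ paths, n ≤ (perm.length : Int) ∧ ∀ v ∈ perm.take n.toNat, 0 ≤ v ∧ v < n
instance (paths : List (List Int)) (n : Int) : Decidable (Pre_compute_symmetrized_N paths n) := by
  unfold Pre_compute_symmetrized_N; infer_instance

def pvWitness_compute_symmetrized_N : List (List Int) × Int := ([[0, 1, 2], [2, 0, 1]], 3)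

def Spec_compute_symmetrized_N (paths : List (List Int)) (n : Int) (out : List (List (List Int))) : Prop := out = compute_symmetrized_N_alt paths n
instance (paths : List (List Int)) (n : Int) (out : List (List (List Int))) : Decidable (Spec_compute_symmetrized_N paths n out) := by unfold Spec_compute_symmetrized_N; infer_instance

-- ===== CLAIM (what is proved, stated in full; the proofs are below) =====
def Claim_equal_compute_symmetrized_N : Prop := ∀ (paths : List (List Int)) (n : Int), Dom_compute_symmetrized_N paths n → Pre_compute_symmetrized_N paths n → Spec_compute_symmetrized_N paths n (compute_symmetrized_N paths n)

-- ===== LEMMAS AND PROOFS =====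

-- the cube generated by an entry function f on directed keys, symmetrized
def pvR (n : Int) (f : Int × Int × Int → Int) : List (List (List Int)) :=
  (PySem.List.pyRange 0 n 1).map (fun a =>
    (PySem.List.pyRange 0 n 1).map (fun b =>
      (PySem.List.pyRange 0 (n - 1) 1).map (fun j => f (a, b, j) + f (b, a, j))))

def pvKeys (perm : List Int) (n : Int) : List (Int × Int × Int) :=
  (PySem.List.pyRange 0 (n - 1) 1).map (fun j =>
    (PySem.List.pyGetD perm j 0, PySem.List.pyGetD perm (j + 1) 0, j))

theorem pv_set_map_pyRange {α : Type} (g : Int → α) (n i : Int) (h0 : 0 ≤ i) (v : α) :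
    ((PySem.List.pyRange 0 n 1).map g).set i.toNat v
      = (PySem.List.pyRange 0 n 1).map (fun x => if x = i then v else g x) := by
  apply List.ext_getElem
  · simp
  · intro p hp hp'
    rw [List.getElem_set, List.getElem_map, List.getElem_map,
        PySem.List.getElem_pyRange_one]
    split_ifs with h1 h2 h2 <;> first | rfl | omega

def pvM (n : Int) (E : Int × Int × Int → Int) : List (List (List Int)) :=
  (PySem.List.pyRange 0 n 1).map (fun a =>
    (PySem.List.pyRange 0 n 1).map (fun b =>
      (PySem.List.pyRange 0 (n - 1) 1).map (fun j => E (a, b, j))))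

theorem pvR_eq_M (n : Int) (f : Int × Int × Int → Int) :
    pvR n f = pvM n (fun k => f k + f (k.2.1, k.1, k.2.2)) := rfl

theorem pv_bump3_M (n : Int) (E : Int × Int × Int → Int) (a b j : Int)
    (ha : 0 ≤ a) (ha' : a < n) (hb : 0 ≤ b) (hb' : b < n) (hj : 0 ≤ j) (hj' : j < n - 1) :
    pvBump3 (pvM n E) a b j = pvM n (fun k => if k = (a, b, j) then E k + 1 else E k) := by
  show _ = _
  simp only [pvBump3, pvM]
  rw [PySem.List.pyGetD_map_pyRange_of_nonneg _ _ _ _ ha ha',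
      PySem.List.pyGetD_map_pyRange_of_nonneg _ _ _ _ hb hb',
      PySem.List.pyGetD_map_pyRange_of_nonneg _ _ _ _ hj hj',
      PySem.List.pySetD_of_nonneg _ _ hj, PySem.List.pySetD_of_nonneg _ _ hb,
      PySem.List.pySetD_of_nonneg _ _ ha,
      pv_set_map_pyRange _ _ _ hj, pv_set_map_pyRange _ _ _ hb, pv_set_map_pyRange _ _ _ ha]
  apply List.map_congr_left
  intro a' hma
  by_cases h1 : a' = a
  · subst h1
    rw [if_pos rfl]
    apply List.map_congr_left
    intro b' hmb
    by_cases h2 : b' = b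
    · subst h2
      rw [if_pos rfl]
      apply List.map_congr_left
      intro j' hmj
      by_cases h3 : j' = j
      · subst h3
        simp
      · simp [h3]
    · simp [Prod.ext_iff, h2]
  · simp [Prod.ext_iff, h1]

theorem pv_double_bump (n : Int) (f : Int × Int × Int → Int) (a b j : Int)
    (ha : 0 ≤ a) (ha' : a < n) (hb : 0 ≤ b) (hb' : b < n) (hj : 0 ≤ j) (hj' : j < n - 1) :
    pvBump3 (pvBump3 (pvR n f) a b j) b a j
      = pvR n (fun k => if k = (a, b, j) then f k + 1 else f k) := by
  rw [pvR_eq_M, pv_bump3_M n _ a b j ha ha' hb hb' hj hj',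
      pv_bump3_M n _ b a j hb hb' ha ha' hj hj', pvR_eq_M]
  apply congrArg
  funext k
  rcases k with ⟨x, y, z⟩
  have hsplit : ∀ (c : Prop) [Decidable c] (t : Int),
      (if c then t + 1 else t) = t + (if c then 1 else 0) := by
    intro c _ t; split <;> ring
  have hc : ((y, x, z) = ((a, b, j) : Int × Int × Int))
      ↔ ((x, y, z) = ((b, a, j) : Int × Int × Int)) := by
    simp only [Prod.mk.injEq]; tauto
  simp only [hsplit, hc]
  ring

theorem pv_inner_fold (n : Int) (perm : List Int)
    (H : ∀ k ∈ pvKeys perm n, 0 ≤ k.1 ∧ k.1 < n ∧ 0 ≤ k.2.1 ∧ k.2.1 < n) :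
    ∀ (L : List Int), (∀ x ∈ L, x ∈ PySem.List.pyRange 0 (n - 1) 1) → ∀ (f : Int × Int × Int → Int),
    (L.foldl (fun N j =>
      pvBump3 (pvBump3 N (PySem.List.pyGetD perm j 0) (PySem.List.pyGetD perm (j + 1) 0) j)
        (PySem.List.pyGetD perm (j + 1) 0) (PySem.List.pyGetD perm j 0) j) (pvR n f))
      = pvR n (fun k => f k +
          ((L.map (fun j => (PySem.List.pyGetD perm j 0, PySem.List.pyGetD perm (j + 1) 0, j))).count k : Int)) := by
  intro L
  induction L with
  | nil => intro _ f; simp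
  | cons j L ih =>
    intro hmem f
    have hj : (0 : Int) ≤ j ∧ j < n - 1 := by
      have := hmem j (List.mem_cons_self ..)
      exact PySem.List.mem_pyRange_one.mp this
    have hkey : ((PySem.List.pyGetD perm j 0, PySem.List.pyGetD perm (j + 1) 0, j) : Int × Int × Int) ∈ pvKeys perm n := by
      unfold pvKeys
      exact List.mem_map_of_mem (hmem j (List.mem_cons_self ..))
    obtain ⟨ha, ha', hb, hb'⟩ := H _ hkey
    rw [List.foldl_cons,
        pv_double_bump n f _ _ j ha ha' hb hb' hj.1 hj.2,
        ih (fun x hx => hmem x (List.mem_cons_of_mem _ hx))]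
    apply congrArg
    funext k
    rw [List.map_cons, List.count_cons]
    by_cases h : (PySem.List.pyGetD perm j 0, PySem.List.pyGetD perm (j + 1) 0, j) = k
    · rw [if_pos ((beq_iff_eq).mpr h), if_pos h.symm]
      push_cast
      ring
    · rw [if_neg (fun hk => h ((beq_iff_eq).mp hk)), if_neg (fun hk => h hk.symm)]
      push_cast
      ring

theorem pv_outer_fold (n : Int) (paths : List (List Int))
    (H : ∀ perm ∈ paths, ∀ k ∈ pvKeys perm n, 0 ≤ k.1 ∧ k.1 < n ∧ 0 ≤ k.2.1 ∧ k.2.1 < n) :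
    ∀ (f : Int × Int × Int → Int),
    (paths.foldl (fun N perm =>
      (PySem.List.pyRange 0 (n - 1) 1).foldl (fun N j =>
        pvBump3 (pvBump3 N (PySem.List.pyGetD perm j 0) (PySem.List.pyGetD perm (j + 1) 0) j)
          (PySem.List.pyGetD perm (j + 1) 0) (PySem.List.pyGetD perm j 0) j) N) (pvR n f))
      = pvR n (fun k => f k + ((paths.flatMap (fun perm => pvKeys perm n)).count k : Int)) := by
  induction paths with
  | nil => intro f; simp
  | cons perm paths ih =>
    intro f
    rw [List.foldl_cons,
        pv_inner_fold n perm (H perm (List.mem_cons_self ..)) _ (fun x hx => hx) f,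
        ih (fun p hp => H p (List.mem_cons_of_mem _ hp))]
    apply congrArg
    funext k
    rw [List.flatMap_cons, List.count_append]
    unfold pvKeys
    push_cast
    ring

-- B side: the foldl of added terms is the sum of a map
theorem pv_foldl_sum (L : List (List Int)) (f : List Int → Int) :
    ∀ (s : Int), L.foldl (fun s p => s + f p) s = s + (L.map f).sum := by
  induction L with
  | nil => intro s; simp
  | cons p L ih =>
    intro s
    rw [List.foldl_cons, ih, List.map_cons, List.sum_cons]
    ring

-- a key with third component j occurs 0 times in keys built from a list avoiding j
theorem pv_count_keys_zero (h1 h2 : Int → Int) (a b j : Int) (L : List Int) (hj : j ∉ L) :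
    (L.map (fun j' => ((h1 j', h2 j', j') : Int × Int × Int))).count (a, b, j) = 0 := by
  rw [List.count_eq_zero]
  intro hm
  obtain ⟨j', hj', he⟩ := List.mem_map.mp hm
  have hjj : j' = j := congrArg (fun t : Int × Int × Int => t.2.2) he
  exact hj (hjj ▸ hj')

theorem pv_count_keys (h1 h2 : Int → Int) (a b j : Int) :
    ∀ (L : List Int), L.Nodup → j ∈ L →
    (L.map (fun j' => ((h1 j', h2 j', j') : Int × Int × Int))).count (a, b, j)
      = if h1 j = a ∧ h2 j = b then 1 else 0 := by
  intro L
  induction L with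
  | nil => intro _ h; exact absurd h (List.not_mem_nil)
  | cons x L ih =>
    intro hnd hm
    have hnd' := List.nodup_cons.mp hnd
    rw [List.map_cons, List.count_cons]
    by_cases hx : x = j
    · subst hx
      rw [pv_count_keys_zero h1 h2 a b x L hnd'.1]
      by_cases hc : h1 x = a ∧ h2 x = b
      · simp [hc.1, hc.2]
      · simp [hc]
    · have hmL : j ∈ L := by
        rcases List.mem_cons.mp hm with h | h
        · exact absurd h.symm hx
        · exact h
      rw [ih hnd'.2 hmL]
      simp
      intro _ _
      exact hx

-- count of a directed key in one path's key list = the indicator B sums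
theorem pv_count_pvKeys (perm : List Int) (n a b j : Int) (hj : 0 ≤ j) (hj' : j < n - 1) :
    ((pvKeys perm n).count (a, b, j) : Int)
      = if PySem.List.pyGetD perm j 0 = a ∧ PySem.List.pyGetD perm (j + 1) 0 = b then 1 else 0 := by
  unfold pvKeys
  rw [pv_count_keys (fun j' => PySem.List.pyGetD perm j' 0)
        (fun j' => PySem.List.pyGetD perm (j' + 1) 0) a b j
        (PySem.List.pyRange 0 (n - 1) 1) (PySem.List.nodup_pyRange_one 0 (n - 1))
        (PySem.List.mem_pyRange_one.mpr ⟨hj, hj'⟩)]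
  split <;> simp

theorem pv_count_flatMap (k : Int × Int × Int) (n : Int) :
    ∀ (paths : List (List Int)),
    ((paths.flatMap (fun perm => pvKeys perm n)).count k : Int)
      = (paths.map (fun perm => ((pvKeys perm n).count k : Int))).sum := by
  intro paths
  induction paths with
  | nil => simp
  | cons p paths ih =>
    rw [List.flatMap_cons, List.count_append, List.map_cons, List.sum_cons, ← ih]
    push_cast
    ring

theorem pv_take_mem (perm : List Int) (n i : Int) (h0 : 0 ≤ i) (hi : i < n)
    (hlen : n ≤ (perm.length : Int)) :
    PySem.List.pyGetD perm i 0 ∈ perm.take n.toNat := by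
  rw [PySem.List.pyGetD_eq_getElem perm 0 h0 (by omega)]
  have hl : i.toNat < (perm.take n.toNat).length := by
    simp only [List.length_take]
    omega
  have : perm[i.toNat] = (perm.take n.toNat)[i.toNat] := (List.getElem_take).symm
  rw [this]
  exact List.getElem_mem hl

theorem pv_bounds (paths : List (List Int)) (n : Int)
    (hpre : Pre_compute_symmetrized_N paths n) :
    ∀ perm ∈ paths, ∀ k ∈ pvKeys perm n, 0 ≤ k.1 ∧ k.1 < n ∧ 0 ≤ k.2.1 ∧ k.2.1 < n := by
  intro perm hp k hk
  unfold pvKeys at hk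
  obtain ⟨j, hj, rfl⟩ := List.mem_map.mp hk
  obtain ⟨hj0, hj1⟩ := PySem.List.mem_pyRange_one.mp hj
  rcases hpre with hn | hpre
  · omega
  · obtain ⟨hlen, hval⟩ := hpre perm hp
    have h1 := hval _ (pv_take_mem perm n j hj0 (by omega) hlen)
    have h2 := hval _ (pv_take_mem perm n (j + 1) (by omega) (by omega) hlen)
    exact ⟨h1.1, h1.2, h2.1, h2.2⟩

-- ===== VERDICT (by name: the statement is the Claim_ definition above) =====
theorem compute_symmetrized_N_spec : Claim_equal_compute_symmetrized_N := by
  intro paths n _dom hpre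
  have H := pv_bounds paths n hpre
  unfold Spec_compute_symmetrized_N
  have h0 : ((PySem.List.pyRange 0 n 1).map (fun _ =>
      (PySem.List.pyRange 0 n 1).map (fun _ => List.replicate (n - 1).toNat (0 : Int))))
      = pvR n (fun _ => 0) := by
    unfold pvR
    apply List.map_congr_left
    intro a _
    apply List.map_congr_left
    intro b _
    apply List.ext_getElem
    · simp
    · intro p hp hp'
      simp
  have hA : compute_symmetrized_N paths n
      = pvR n (fun k => ((paths.flatMap (fun perm => pvKeys perm n)).count k : Int)) := by
    show _ = _
    simp only [compute_symmetrized_N]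
    rw [h0, pv_outer_fold n paths H]
    apply congrArg
    funext k
    simp
  rw [hA]
  show pvR n _ = _
  simp only [pvR, compute_symmetrized_N_alt]
  apply List.map_congr_left
  intro a _
  apply List.map_congr_left
  intro b _
  apply List.map_congr_left
  intro j hjm
  obtain ⟨hj0, hj1⟩ := PySem.List.mem_pyRange_one.mp hjm
  rw [pv_foldl_sum paths _ 0, pv_count_flatMap, pv_count_flatMap, zero_add,
      ← List.sum_map_add]
  apply congrArg
  apply List.map_congr_left
  intro p _
  rw [pv_count_pvKeys p n a b j hj0 hj1, pv_count_pvKeys p n b a j hj0 hj1]
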